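-- pv_equiv track=rewrite | github.com/HuDaQian/lqbe.github.io | trans/answer_change.py | split_string_by_keywords
-- ===== SOURCE A (Python) =====
-- def split_string_by_keywords(input_string, keywords):
--     # 初始化一个结果列表
--     result = []
--     # 用于追踪当前分割位置
--     last_index = 0
--
--     # 当前字符串长度
--     input_length = len(input_string)
--
--     while last_index < input_length:
--         # 找到下一个关键词的最小索引
--         next_keyword_index = -1
--         next_keyword = None
--
--         # 遍历关键词以找到下一个关键词
--         for keyword in keywords:
--             index = input_string.find(keyword, last_index)
--             if index != -1 and (next_keyword_index == -1 or index < next_keyword_index):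
--                 next_keyword_index = index
--                 next_keyword = keyword
--
--         # 如果没有找到任何关键词，结束循环
--         if next_keyword_index == -1:
--             break
--
--         # 将关键词之前的部分添加到结果列表
--         if last_index < next_keyword_index:
--             result.append(input_string[last_index:next_keyword_index].strip())
--
--         # 将当前关键词及其后面的内容一起添加到结果
--         last_index = next_keyword_index + len(next_keyword)
--
--     # 添加最后一个分割后的部分（如果有的话）
--     if last_index < input_length:
--         result.append(input_string[last_index:].strip())
--
--     return result
-- ===== SOURCE B (Python) =====
-- def split_string_by_keywords(input_string, keywords):
--     # One left-to-right scan: at each position take the first keyword that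
--     # starts there (list order = tie-break), emit the stripped text since the
--     # previous keyword; no repeated str.find restarts from scratch.
--     result = []
--     seg_start = 0
--     i = 0
--     n = len(input_string)
--     while i < n:
--         kw = next((k for k in keywords if input_string.startswith(k, i)), None)
--         if kw is None:
--             i += 1
--         else:
--             if seg_start < i:
--                 result.append(input_string[seg_start:i].strip())
--             i += len(kw)
--             seg_start = i
--     if seg_start < n:
--         result.append(input_string[seg_start:].strip())
--     return result
-- ===== Notes on version B (the rewrite author's own statement) =====
-- stated objective: faster
-- what changed: A restarts one str.find per keyword from every split point and minimises over the results; B makes a single left-to-right scan of the string, taking at each position the first keyword in list order that starts there, so no find is ever restarted.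
-- outside the precondition, e.g. on split_string_by_keywords('ab', ['ab', '']): A returns [], B returns []
import Mathlib
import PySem

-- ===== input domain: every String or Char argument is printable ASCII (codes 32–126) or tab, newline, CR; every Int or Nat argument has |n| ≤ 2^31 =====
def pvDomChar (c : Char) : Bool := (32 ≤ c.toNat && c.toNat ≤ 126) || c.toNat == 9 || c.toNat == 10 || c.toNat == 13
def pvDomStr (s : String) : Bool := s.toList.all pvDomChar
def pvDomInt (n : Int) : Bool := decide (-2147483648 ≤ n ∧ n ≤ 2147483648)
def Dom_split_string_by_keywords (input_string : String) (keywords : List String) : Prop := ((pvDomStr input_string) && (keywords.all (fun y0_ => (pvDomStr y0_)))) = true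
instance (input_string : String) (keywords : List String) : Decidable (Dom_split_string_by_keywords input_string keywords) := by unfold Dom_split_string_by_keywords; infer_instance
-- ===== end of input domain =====

-- B replaces A's per-keyword restarted str.find minimisation by a single left-to-right
-- scan taking the first keyword that starts at each position (alternative algorithm).


-- ===== PORT A =====
-- inner 'for keyword in keywords' loop: fold carrying (next_keyword_index, next_keyword)
def pvAStep (cs : List Char) (kws : List String) (last : Int) : Int × Option String :=
  kws.foldl (fun st kw =>
    let index := PySem.Chars.findFrom cs kw.toList last none
    if index ≠ -1 ∧ (st.1 = -1 ∨ index < st.1) then (index, some kw) else st)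
    (-1, none)

-- the post-loop 'if last_index < input_length: result.append(...)'
def pvATail (cs : List Char) (last : Int) (acc : List String) : List String :=
  if last < (cs.length : Int) then
    acc ++ [String.ofList (PySem.Chars.strip (PySem.Chars.slice cs last none))]
  else acc

-- the 'while last_index < input_length' loop; fuel only makes the recursion total
-- (with '' among the keywords the Python loop can fail to advance — excluded by Pre_)
def pvALoop (cs : List Char) (kws : List String) : Nat → Int → List String → List String
  | 0, last, acc => pvATail cs last acc
  | fuel + 1, last, acc =>
    if last < (cs.length : Int) then
      let st := pvAStep cs kws last
      if st.1 = -1 then pvATail cs last acc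
      else
        let kw := st.2.getD ""
        let acc' := if last < st.1 then
          acc ++ [String.ofList (PySem.Chars.strip (PySem.Chars.slice cs (some last) (some st.1)))]
          else acc
        pvALoop cs kws fuel (st.1 + (kw.toList.length : Int)) acc'
    else pvATail cs last acc

def split_string_by_keywords (input_string : String) (keywords : List String) : List String :=
  pvALoop input_string.toList keywords (input_string.toList.length + 1) 0 []

-- ===== PORT B =====
-- 'next((k for k in keywords if input_string.startswith(k, i)), None)';
-- s.startswith(k, i) for 0 ≤ i is exactly startswith on the drop at i (exact on this domain)
def pvBMatch (cs : List Char) (kws : List String) (i : Nat) : Option String :=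
  kws.find? (fun kw => PySem.Chars.startswith (cs.drop i) kw.toList)

-- the single 'while i < n' scan of Source B; fuel only makes the recursion total
def pvBLoop (cs : List Char) (kws : List String) : Nat → Nat → Nat → List String → List String
  | 0, segStart, _, acc =>
    if segStart < cs.length then
      acc ++ [String.ofList (PySem.Chars.strip (cs.drop segStart))] else acc
  | fuel + 1, segStart, i, acc =>
    if i < cs.length then
      match pvBMatch cs kws i with
      | none => pvBLoop cs kws fuel segStart (i + 1) acc
      | some kw =>
        let acc' := if segStart < i then
          acc ++ [String.ofList (PySem.Chars.strip (PySem.Chars.slice cs (some (segStart : Int)) (some (i : Int))))]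
          else acc
        pvBLoop cs kws fuel (i + kw.toList.length) (i + kw.toList.length) acc'
    else
      if segStart < cs.length then
        acc ++ [String.ofList (PySem.Chars.strip (cs.drop segStart))] else acc

def split_string_by_keywords_alt (input_string : String) (keywords : List String) : List String :=
  pvBLoop input_string.toList keywords (input_string.toList.length + 1) 0 0 []

-- ===== PRECONDITION & SPEC =====
-- Pre_ excludes inputs whose keyword list contains the empty string together with a
-- nonempty input string: there the empty keyword is found at the current position with
-- length 0, so A's loop (and B's) almost always fails to advance and diverges; in the
-- rare shadowed cases where an earlier keyword always wins the tie both A and B return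
-- the same value anyway.
def Pre_split_string_by_keywords (input_string : String) (keywords : List String) : Prop :=
  input_string = "" ∨ "" ∉ keywords
instance (input_string : String) (keywords : List String) : Decidable (Pre_split_string_by_keywords input_string keywords) := by unfold Pre_split_string_by_keywords; infer_instance

def pvWitness_split_string_by_keywords : String × List String := ("foo, bar; baz", [",", ";"])

def Spec_split_string_by_keywords (input_string : String) (keywords : List String) (out : List String) : Prop := out = split_string_by_keywords_alt input_string keywords
instance (input_string : String) (keywords : List String) (out : List String) : Decidable (Spec_split_string_by_keywords input_string keywords out) := by unfold Spec_split_string_by_keywords; infer_instance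

-- ===== CLAIM (what is proved, stated in full; the proofs are below) =====
def Claim_equal_split_string_by_keywords : Prop := ∀ (input_string : String) (keywords : List String), Dom_split_string_by_keywords input_string keywords → Pre_split_string_by_keywords input_string keywords → Spec_split_string_by_keywords input_string keywords (split_string_by_keywords input_string keywords)

-- ===== LEMMAS AND PROOFS =====

-- proof-side view of A's inner fold with an arbitrary start state
def pvAFold (cs : List Char) (last : Int) (l : List String) (st : Int × Option String) : Int × Option String :=
  l.foldl (fun st kw =>
    let index := PySem.Chars.findFrom cs kw.toList last none
    if index ≠ -1 ∧ (st.1 = -1 ∨ index < st.1) then (index, some kw) else st) st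

theorem pvAStep_eq_fold (cs : List Char) (kws : List String) (last : Int) :
    pvAStep cs kws last = pvAFold cs last kws (-1, none) := rfl

theorem pvFind?_congr_mem {α : Type} (l : List α) (p q : α → Bool)
    (h : ∀ a ∈ l, p a = q a) : l.find? p = l.find? q := by
  induction l with
  | nil => rfl
  | cons a t ih =>
    simp only [List.find?]
    rw [h a (by simp)]
    cases hq : q a
    · simpa using ih (fun b hb => h b (by simp [hb]))
    · rfl

theorem pvAFold_keep (cs : List Char) (last : Int) (l : List String) (st : Int × Option String)
    (h0 : 0 ≤ st.1)
    (hall : ∀ kw ∈ l, PySem.Chars.findFrom cs kw.toList last none = -1 ∨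
      st.1 ≤ PySem.Chars.findFrom cs kw.toList last none) :
    pvAFold cs last l st = st := by
  induction l generalizing st with
  | nil => rfl
  | cons kw0 t ih =>
    have h := hall kw0 (by simp)
    simp only [pvAFold, List.foldl_cons]
    have hst : (if PySem.Chars.findFrom cs kw0.toList last none ≠ -1 ∧
        (st.1 = -1 ∨ PySem.Chars.findFrom cs kw0.toList last none < st.1) then
        (PySem.Chars.findFrom cs kw0.toList last none, some kw0) else st) = st := by
      apply if_neg
      rintro ⟨h1, h2 | h3⟩ <;> omega
    rw [hst]
    exact ih st h0 (fun kw hkw => hall kw (by simp [hkw]))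

theorem pvAFold_none (cs : List Char) (last : Int) (l : List String) (st : Int × Option String)
    (hall : ∀ kw ∈ l, PySem.Chars.findFrom cs kw.toList last none = -1) :
    pvAFold cs last l st = st := by
  induction l generalizing st with
  | nil => rfl
  | cons kw0 t ih =>
    simp only [pvAFold, List.foldl_cons]
    have hst : (if PySem.Chars.findFrom cs kw0.toList last none ≠ -1 ∧
        (st.1 = -1 ∨ PySem.Chars.findFrom cs kw0.toList last none < st.1) then
        (PySem.Chars.findFrom cs kw0.toList last none, some kw0) else st) = st := by
      apply if_neg
      rintro ⟨h1, _⟩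
      exact h1 (hall kw0 (by simp))
    rw [hst]
    exact ih st (fun kw hkw => hall kw (by simp [hkw]))

theorem pvAFold_min (cs : List Char) (last : Int) (m : Int) (hm : 0 ≤ m) :
    ∀ (l : List String) (st : Int × Option String) (kwm : String),
    (st.1 = -1 ∨ m < st.1) →
    (∀ kw ∈ l, PySem.Chars.findFrom cs kw.toList last none = -1 ∨
      m ≤ PySem.Chars.findFrom cs kw.toList last none) →
    l.find? (fun kw => PySem.Chars.findFrom cs kw.toList last none == m) = some kwm →
    pvAFold cs last l st = (m, some kwm) := by
  intro l
  induction l with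
  | nil => intro st kwm _ _ hfind; simp at hfind
  | cons kw0 t ih =>
    intro st kwm hst hall hfind
    by_cases hc : PySem.Chars.findFrom cs kw0.toList last none = m
    · rw [List.find?_cons_of_pos (by simp [hc])] at hfind
      injection hfind with hkwm
      subst hkwm
      simp only [pvAFold, List.foldl_cons]
      have hst' : (if PySem.Chars.findFrom cs kw0.toList last none ≠ -1 ∧
          (st.1 = -1 ∨ PySem.Chars.findFrom cs kw0.toList last none < st.1) then
          (PySem.Chars.findFrom cs kw0.toList last none, some kw0) else st)
          = (m, some kw0) := by
        rw [if_pos]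
        · rw [hc]
        · constructor
          · omega
          · rcases hst with h | h
            · exact Or.inl h
            · exact Or.inr (by omega)
      rw [hst']
      exact pvAFold_keep cs last t (m, some kw0) hm
        (fun kw hkw => hall kw (by simp [hkw]))
    · rw [List.find?_cons_of_neg (by simp [hc])] at hfind
      simp only [pvAFold, List.foldl_cons]
      have h0 := hall kw0 (by simp)
      by_cases hcond : PySem.Chars.findFrom cs kw0.toList last none ≠ -1 ∧
          (st.1 = -1 ∨ PySem.Chars.findFrom cs kw0.toList last none < st.1)
      · rw [if_pos hcond]
        exact ih (PySem.Chars.findFrom cs kw0.toList last none, some kw0) kwm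
          (Or.inr (by rcases h0 with h | h <;> omega))
          (fun kw hkw => hall kw (by simp [hkw])) hfind
      · rw [if_neg hcond]
        exact ih st kwm hst (fun kw hkw => hall kw (by simp [hkw])) hfind

-- a keyword that prefixes nothing at or after k is not found by findFrom
theorem pvNoMatch_all_neg (cs : List Char) (kws : List String) (k : Nat)
    (hk' : ∀ kw ∈ kws, kw.toList ≠ [])
    (hkn : k ≤ cs.length)
    (hnone : ∀ j, k ≤ j → j < cs.length → pvBMatch cs kws j = none) :
    ∀ kw ∈ kws, PySem.Chars.findFrom cs kw.toList (k : Int) none = -1 := by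
  intro kw hkw
  rw [PySem.Chars.findFrom_natCast_eq_neg_one_iff cs kw.toList k hkn]
  intro hinf
  have hin : PySem.Chars.isIn kw.toList (cs.drop k) = true :=
    (PySem.Chars.isIn_iff_infix _ _).2 hinf
  obtain ⟨j, hj⟩ := (PySem.Chars.exists_prefix_drop_iff_isIn kw.toList (cs.drop k)).2 hin
  rw [List.drop_drop] at hj
  by_cases hjn : k + j < cs.length
  · have := hnone (k + j) (by omega) hjn
    rw [pvBMatch, List.find?_eq_none] at this
    exact absurd ((PySem.Chars.startswith_iff _ _).2 hj) (by simpa using this kw hkw)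
  · have : cs.drop (k + j) = [] := List.drop_eq_nil_of_le (by omega)
    rw [this] at hj
    exact hk' kw hkw (List.prefix_nil.1 hj)

-- A's inner fold at the first position p ≥ k where some keyword matches picks
-- exactly (p, the first keyword in list order matching at p)
theorem pvMatch_step (cs : List Char) (kws : List String) (k p : Nat) (kwm : String)
    (hkp : k ≤ p) (hpn : p < cs.length)
    (hnone : ∀ j, k ≤ j → j < p → pvBMatch cs kws j = none)
    (hm : pvBMatch cs kws p = some kwm) :
    pvAStep cs kws (k : Int) = ((p : Int), some kwm) := by
  have hkn : k ≤ cs.length := by omega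
  have hb : ∀ kw ∈ kws, PySem.Chars.findFrom cs kw.toList (k : Int) none = -1 ∨
      (p : Int) ≤ PySem.Chars.findFrom cs kw.toList (k : Int) none := by
    intro kw hkw
    by_cases h1 : PySem.Chars.findFrom cs kw.toList (k : Int) none = -1
    · exact Or.inl h1
    · right
      obtain ⟨hkle, hqpre, hqmin⟩ := PySem.Chars.findFrom_natCast_spec cs kw.toList k hkn h1
      by_contra hlt
      have hq0 : 0 ≤ PySem.Chars.findFrom cs kw.toList (k : Int) none := by omega
      have hqk : k ≤ (PySem.Chars.findFrom cs kw.toList (k : Int) none).toNat := by omega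
      have hqp : (PySem.Chars.findFrom cs kw.toList (k : Int) none).toNat < p := by omega
      have hn := hnone _ hqk hqp
      rw [pvBMatch, List.find?_eq_none] at hn
      exact absurd ((PySem.Chars.startswith_iff _ _).2 hqpre) (by simpa using hn kw hkw)
  have hc : ∀ kw ∈ kws, (PySem.Chars.findFrom cs kw.toList (k : Int) none = (p : Int) ↔
      kw.toList <+: cs.drop p) := by
    intro kw hkw
    constructor
    · intro he
      have h1 : PySem.Chars.findFrom cs kw.toList (k : Int) none ≠ -1 := by omega
      obtain ⟨_, hqpre, _⟩ := PySem.Chars.findFrom_natCast_spec cs kw.toList k hkn h1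
      rwa [he, Int.toNat_natCast] at hqpre
    · intro hp'
      have hinf : kw.toList <:+: cs.drop k := by
        rw [← PySem.Chars.isIn_iff_infix]
        rw [← PySem.Chars.exists_prefix_drop_iff_isIn]
        exact ⟨p - k, by rw [List.drop_drop, Nat.add_sub_cancel' hkp]; exact hp'⟩
      have h1 : PySem.Chars.findFrom cs kw.toList (k : Int) none ≠ -1 := fun habs =>
        ((PySem.Chars.findFrom_natCast_eq_neg_one_iff cs kw.toList k hkn).1 habs) hinf
      obtain ⟨hkle, hqpre, hqmin⟩ := PySem.Chars.findFrom_natCast_spec cs kw.toList k hkn h1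
      rcases hb kw hkw with h | h
      · exact absurd h h1
      · by_cases hq : (PySem.Chars.findFrom cs kw.toList (k : Int) none).toNat = p
        · omega
        · exact absurd hp' (hqmin p hkp (by omega))
  have hfind : kws.find? (fun kw => PySem.Chars.findFrom cs kw.toList (k : Int) none == (p : Int))
      = some kwm := by
    rw [pvFind?_congr_mem kws _ (fun kw => PySem.Chars.startswith (cs.drop p) kw.toList)
      (by
        intro kw hkw
        by_cases hkwp : kw.toList <+: cs.drop p
        · simp [(hc kw hkw).2 hkwp, (PySem.Chars.startswith_iff _ _).2 hkwp]
        · have h2 : PySem.Chars.findFrom cs kw.toList (k : Int) none ≠ (p : Int) :=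
            fun he => hkwp ((hc kw hkw).1 he)
          have h3 : PySem.Chars.startswith (cs.drop p) kw.toList = false := by
            rw [← Bool.not_eq_true, PySem.Chars.startswith_iff]
            exact hkwp
          simp [h2, h3])]
    exact hm
  rw [pvAStep_eq_fold]
  exact pvAFold_min cs (k : Int) (p : Int) (by omega) kws (-1, none) kwm (Or.inl rfl) hb hfind

-- B's fuel only makes the recursion total: any sufficient fuel gives the same value
theorem pvBLoop_fuel (cs : List Char) (kws : List String)
    (hk' : ∀ kw ∈ kws, kw.toList ≠ []) :
    ∀ fuel₁ fuel₂ seg i acc, cs.length - i < fuel₁ → cs.length - i < fuel₂ →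
    pvBLoop cs kws fuel₁ seg i acc = pvBLoop cs kws fuel₂ seg i acc := by
  intro fuel₁
  induction fuel₁ with
  | zero => intro fuel₂ seg i acc h1 _; omega
  | succ f ih =>
    intro fuel₂ seg i acc h1 h2
    match fuel₂, h2 with
    | f₂ + 1, h2 =>
    by_cases hi : i < cs.length
    · simp only [pvBLoop, if_pos hi]
      cases hmatch : pvBMatch cs kws i with
      | none => exact ih f₂ seg (i + 1) acc (by omega) (by omega)
      | some kw =>
        have hlen : 1 ≤ kw.toList.length :=
          List.length_pos_of_ne_nil (hk' kw (List.mem_of_find?_eq_some hmatch))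
        exact ih f₂ _ _ _ (by omega) (by omega)
    · simp only [pvBLoop, if_neg hi]

-- scanning over a stretch with no match just moves i forward
theorem pvBLoop_scan (cs : List Char) (kws : List String)
    (hk' : ∀ kw ∈ kws, kw.toList ≠ []) :
    ∀ fuel₁ (i p : Nat) (fuel₂ : Nat) (seg : Nat) (acc : List String), i ≤ p → p ≤ cs.length →
    (∀ j, i ≤ j → j < p → pvBMatch cs kws j = none) →
    cs.length - i < fuel₁ → cs.length - p < fuel₂ →
    pvBLoop cs kws fuel₁ seg i acc = pvBLoop cs kws fuel₂ seg p acc := by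
  intro fuel₁
  induction fuel₁ with
  | zero => intro i p fuel₂ seg acc _ _ _ h1 _; omega
  | succ f ih =>
    intro i p fuel₂ seg acc hip hpn hnone h1 h2
    rcases Nat.eq_or_lt_of_le hip with heq | hlt
    · subst heq; exact pvBLoop_fuel cs kws hk' (f + 1) fuel₂ seg i acc h1 h2
    · have hi : i < cs.length := by omega
      simp only [pvBLoop, if_pos hi, hnone i le_rfl hlt]
      exact ih (i + 1) p fuel₂ seg acc (by omega) hpn
        (fun j hj1 hj2 => hnone j (by omega) hj2) (by omega) h2

-- the two loops agree from any common split point k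
theorem pvMain (cs : List Char) (kws : List String)
    (hk' : ∀ kw ∈ kws, kw.toList ≠ []) :
    ∀ (fuel : Nat) (k : Nat) (acc : List String), k ≤ cs.length → cs.length - k < fuel →
    pvALoop cs kws fuel (k : Int) acc = pvBLoop cs kws fuel k k acc := by
  intro fuel
  induction fuel with
  | zero => intro k acc _ h; omega
  | succ f ih =>
    intro k acc hkn hf
    by_cases hklt : k < cs.length
    · have hA : ((k : Int) < (cs.length : Int)) := by omega
      by_cases hall : ∀ j, k ≤ j → j < cs.length → pvBMatch cs kws j = none
      · have hneg := pvNoMatch_all_neg cs kws k hk' hkn hall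
        have hstep : pvAStep cs kws (k : Int) = (-1, none) := by
          rw [pvAStep_eq_fold]; exact pvAFold_none _ _ _ _ hneg
        rw [pvBLoop_scan cs kws hk' (f + 1) k cs.length 1 k acc (le_of_lt hklt) le_rfl
          hall (by omega) (by omega)]
        simp only [pvALoop, if_pos hA, hstep, pvBLoop, lt_irrefl, if_pos hklt, pvATail]
        simp [PySem.Chars.slice_eq_listSlice, PySem.List.slice_from_natCast]
      · have hex : ∃ j, k ≤ j ∧ j < cs.length ∧ pvBMatch cs kws j ≠ none := by
          by_contra hno
          apply hall
          intro j hj1 hj2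
          by_contra hne
          exact hno ⟨j, hj1, hj2, hne⟩
        have hPp := Nat.find_spec hex
        have hnone : ∀ j, k ≤ j → j < Nat.find hex → pvBMatch cs kws j = none := by
          intro j hj1 hj2
          by_contra hne
          exact Nat.find_min hex hj2 ⟨hj1, by omega, hne⟩
        obtain ⟨kwm, hm⟩ := Option.ne_none_iff_exists'.1 hPp.2.2
        have hstep := pvMatch_step cs kws k (Nat.find hex) kwm hPp.1 hPp.2.1 hnone hm
        have hm' := hm
        rw [pvBMatch] at hm'
        have hmem : kwm ∈ kws := List.mem_of_find?_eq_some hm'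
        have hlen : 1 ≤ kwm.toList.length :=
          List.length_pos_of_ne_nil (hk' kwm hmem)
        have hpre : kwm.toList <+: cs.drop (Nat.find hex) :=
          (PySem.Chars.startswith_iff _ _).1 (by simpa using List.find?_some hm')
        have hplen : Nat.find hex + kwm.toList.length ≤ cs.length := by
          have := hpre.length_le
          rw [List.length_drop] at this
          omega
        rw [pvBLoop_scan cs kws hk' (f + 1) k (Nat.find hex) (f + 1) k acc hPp.1
          (le_of_lt hPp.2.1) hnone (by omega) (by omega)]
        simp only [pvALoop, if_pos hA, hstep, pvBLoop, if_pos hPp.2.1, hm]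
        rw [if_neg (show ¬ (((Nat.find hex : Nat) : Int) = -1) by omega)]
        simp only [Option.getD_some, Nat.cast_lt]
        have hc1 : ((Nat.find hex : Nat) : Int) + (kwm.toList.length : Int)
            = (((Nat.find hex + kwm.toList.length : Nat)) : Int) := by push_cast; ring
        rw [hc1]
        exact ih (Nat.find hex + kwm.toList.length) _ hplen (by omega)
    · have hA : ¬ ((k : Int) < (cs.length : Int)) := by omega
      simp only [pvALoop, if_neg hA, pvBLoop, if_neg hklt, pvATail]

-- ===== VERDICT (by name: the statement is the Claim_ definition above) =====
theorem split_string_by_keywords_spec : Claim_equal_split_string_by_keywords := by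
  intro s kws _ hpre
  unfold Spec_split_string_by_keywords
  unfold split_string_by_keywords split_string_by_keywords_alt
  rcases hpre with hs | hnil
  · subst hs
    have h0 : ("" : String).toList = [] := by simp
    rw [h0]
    simp [pvALoop, pvATail, pvBLoop]
  · have hk' : ∀ kw ∈ kws, kw.toList ≠ [] := by
      intro kw hkw h
      apply hnil
      have hkwe : kw = "" := String.toList_inj.mp (by simp [h])
      exact hkwe ▸ hkw
    have hmain := pvMain s.toList kws hk' (s.toList.length + 1) 0 [] (by omega) (by omega)
    simpa using hmain
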